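-- pv_equiv track=rewrite | github.com/heydracarys/Python-Projects | main.py | turnOver
-- ===== SOURCE A (Python) =====
-- def turnOver(a):
--     for i in range(len(a)-1):
--       if  a[i]=='1':
--             a[i]='0'
--             if a[i+1]=='0':
--                 a[i+1]='1'
--             else:
--                 a[i+1]='0'
--
--     return a
-- ===== SOURCE B (Python) =====
-- def turnOver(a):
--     # Staged: (1) compute the full carry scan, (2) rebuild contents pointwise
--     # from (bit, carry) pairs, (3) splice back in place (same object returned).
--     if len(a) <= 1:
--         return a
--     carries = [False]
--     for x in a[:-1]:
--         carries.append(x == ('0' if carries[-1] else '1'))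
--     body = [x if (not c and x != '1') else '0' for x, c in zip(a[:-1], carries)]
--     last = a[-1]
--     if carries[-1]:
--         last = '1' if last == '0' else '0'
--     a[:] = body + [last]
--     return a
-- ===== Notes on version B (the rewrite author's own statement) =====
-- stated objective: alternative
-- what changed: B works in three stages - it first builds the whole carry-scan table in one pass, then rebuilds the list contents pointwise from (bit, carry) pairs, and splices the result back - instead of A's single pass that writes ahead into a[i+1].
import Mathlib
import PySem

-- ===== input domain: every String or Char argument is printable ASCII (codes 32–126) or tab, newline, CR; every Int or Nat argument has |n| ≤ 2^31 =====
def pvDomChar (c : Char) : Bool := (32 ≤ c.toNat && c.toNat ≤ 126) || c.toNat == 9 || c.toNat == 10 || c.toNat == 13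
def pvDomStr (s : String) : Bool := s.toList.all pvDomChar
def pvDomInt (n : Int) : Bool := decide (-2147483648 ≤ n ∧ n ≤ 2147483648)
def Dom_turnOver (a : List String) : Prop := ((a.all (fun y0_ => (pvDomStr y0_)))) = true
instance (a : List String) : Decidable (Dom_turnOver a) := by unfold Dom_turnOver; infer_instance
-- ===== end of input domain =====

-- B replaces A's write-ahead single pass with a staged computation (carry scan, then pointwise rebuild,
-- then splice) at the same cost (objective: alternative). Both Pythons mutate `a` in place and return
-- the same object; the equivalence proved here is about the RETURN value.

-- ===== PORT A =====
-- one iteration of A's for-loop body at index i (indices from range(len(a)-1) are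
-- always in range, so getD with a dummy default is exact here)
def stepA (acc : List String) (i : Nat) : List String :=
  if acc.getD i "" = "1" then
    let acc1 := acc.set i "0"
    if acc1.getD (i + 1) "" = "0" then acc1.set (i + 1) "1" else acc1.set (i + 1) "0"
  else acc

def turnOver (a : List String) : List String :=
  (List.range (a.length - 1)).foldl stepA a

-- ===== PORT B =====
-- stage 1 of B: the loop appending to `carries`; reading carries[-1] is getLastD
-- (the list starts at [false] and only grows, so it is never empty)
def carryStep (cs : List Bool) (x : String) : List Bool :=
  cs ++ [x == (if cs.getLastD false then "0" else "1")]

-- stage 2 of B: the comprehension body for one (x, c) pair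
def bodyElem (p : String × Bool) : String :=
  if !p.2 && p.1 ≠ "1" then p.1 else "0"

-- a[:-1] is ported as dropLast and a[-1] as getLastD (exact: the guard ensures a ≠ []);
-- zip truncates to the shorter list exactly like Python's zip
def turnOver_alt (a : List String) : List String :=
  if a.length ≤ 1 then a
  else
    let carries := a.dropLast.foldl carryStep [false]
    let body := (a.dropLast.zip carries).map bodyElem
    let last0 := a.getLastD ""
    let last := if carries.getLastD false then (if last0 = "0" then "1" else "0") else last0
    body ++ [last]

-- ===== PRECONDITION & SPEC =====
def Spec_turnOver (a : List String) (out : List String) : Prop := out = turnOver_alt a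
instance (a : List String) (out : List String) : Decidable (Spec_turnOver a out) := by unfold Spec_turnOver; infer_instance

-- ===== CLAIM (what is proved, stated in full; the proofs are below) =====
def Claim_equal_turnOver : Prop := ∀ (a : List String), Dom_turnOver a → Spec_turnOver a (turnOver a)

-- ===== LEMMAS AND PROOFS =====

-- reference recursion equivalent to A's loop
def recA : List String → List String
  | [] => []
  | [x] => [x]
  | x :: y :: rest =>
      if x = "1" then "0" :: recA ((if y = "0" then "1" else "0") :: rest)
      else x :: recA (y :: rest)
termination_by l => l.length

-- reference recursion with an explicit carry, used as the bridge between the two ports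
def recB : List String → Bool → List String
  | [], _ => []
  | [x], c => if c then [if x = "0" then "1" else "0"] else [x]
  | x :: y :: rest, c =>
      let cur := if c then (if x = "0" then "1" else "0") else x
      if cur = "1" then "0" :: recB (y :: rest) true else cur :: recB (y :: rest) false

theorem stepA_cons (x : String) (xs : List String) (i : Nat) :
    stepA (x :: xs) (i + 1) = x :: stepA xs i := by
  simp only [stepA, List.getD_cons_succ, List.set_cons_succ]
  split
  · split <;> rfl
  · rfl

theorem foldl_stepA_shift (l : List Nat) :
    ∀ (x : String) (xs : List String),
      l.foldl (fun acc j => stepA acc (j + 1)) (x :: xs) = x :: l.foldl stepA xs := by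
  induction l with
  | nil => intro x xs; simp
  | cons j t ih => intro x xs; simp [List.foldl_cons, stepA_cons, ih]

theorem turnOver_eq_recA (a : List String) : turnOver a = recA a := by
  induction hn : a.length using Nat.strong_induction_on generalizing a with
  | _ n ih =>
    match a with
    | [] => simp [turnOver, recA]
    | [x] => simp [turnOver, recA]
    | x :: y :: rest =>
      have hr : List.range ((x :: y :: rest).length - 1)
          = 0 :: (List.range ((y :: rest).length - 1)).map (· + 1) := by
        simp [List.range_succ_eq_map]
      have ihtail : ∀ (b : List String), b.length = (y :: rest).length →
          turnOver b = recA b := by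
        intro b hb
        exact ih (y :: rest).length (by subst hn; simp) b hb
      show turnOver (x :: y :: rest) = recA (x :: y :: rest)
      rw [turnOver, hr]
      simp only [List.foldl_cons, List.foldl_map]
      by_cases hx : x = "1"
      · have h0 : stepA (x :: y :: rest) 0
            = "0" :: (if y = "0" then "1" else "0") :: rest := by
          subst hx
          by_cases hy : y = "0" <;> simp [stepA, hy]
        rw [h0, foldl_stepA_shift]
        have := ihtail ((if y = "0" then "1" else "0") :: rest) (by simp)
        rw [turnOver] at this
        simp only [List.length_cons] at this ⊢
        rw [this]
        simp [recA, hx]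
      · have h0 : stepA (x :: y :: rest) 0 = x :: y :: rest := by
          simp [stepA, hx]
        rw [h0, foldl_stepA_shift]
        have := ihtail (y :: rest) rfl
        rw [turnOver] at this
        simp only [List.length_cons] at this ⊢
        rw [this]
        simp [recA, hx]

theorem recA_eq_recB : ∀ (xs : List String) (c : Bool),
    recB xs c = recA (if c then (match xs with
      | [] => []
      | x :: t => (if x = "0" then "1" else "0") :: t) else xs) := by
  intro xs
  induction xs with
  | nil => intro c; cases c <;> simp [recA, recB]
  | cons x t ih =>
    intro c
    match t with
    | [] => cases c <;> simp [recA, recB]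
    | y :: rest =>
      cases c with
      | false =>
        simp only [recB, if_neg (by simp : ¬ (false = true))]
        by_cases hx : x = "1"
        · have h1 := ih true
          simp at h1
          simp [hx, recA, h1]
        · have h0 := ih false
          simp at h0
          simp [hx, recA, h0]
      | true =>
        simp only [recB]
        by_cases hx0 : x = "0"
        · have h1 := ih true
          simp at h1
          simp [hx0, recA, h1]
        · have h0 := ih false
          simp at h0
          simp [hx0, recA, h0]

-- the carry-scan transition function, abstracted from carryStep
def carryF (c : Bool) (x : String) : Bool := x == (if c then "0" else "1")

-- the carry scan as a plain recursion (reference form of stage 1)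
def scanC (c : Bool) : List String → List Bool
  | [] => [c]
  | x :: t => c :: scanC (carryF c x) t

theorem scanC_ne_nil (c : Bool) (xs : List String) : scanC c xs ≠ [] := by
  cases xs <;> simp [scanC]

-- B's append-loop builds exactly the carry scan
theorem foldl_carryStep_eq_scanC : ∀ (xs : List String) (cs : List Bool) (c : Bool),
    cs.getLastD false = c →
    xs.foldl carryStep cs = cs ++ (scanC c xs).tail := by
  intro xs
  induction xs with
  | nil => intro cs c _; simp [scanC]
  | cons x t ih =>
    intro cs c hc
    have hstep : carryStep cs x = cs ++ [carryF c x] := by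
      simp only [carryStep, carryF, hc]
    rw [List.foldl_cons, hstep, ih (cs ++ [carryF c x]) (carryF c x) (by simp)]
    cases t <;> simp [scanC]

-- the staged computation (zip-map body ++ processed last) equals recB, for any initial carry
theorem staged_eq_recB : ∀ (l : List String) (c : Bool), l ≠ [] →
    (l.dropLast.zip (scanC c l.dropLast)).map bodyElem
      ++ [if (scanC c l.dropLast).getLastD false
            then (if l.getLastD "" = "0" then "1" else "0") else l.getLastD ""]
    = recB l c := by
  intro l
  induction l with
  | nil => intro c h; exact absurd rfl h
  | cons x t ih =>
    intro c _
    match t with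
    | [] =>
      cases c <;> simp [scanC, recB]
    | y :: rest =>
      have hne : (y :: rest : List String) ≠ [] := by simp
      have hdl : (x :: y :: rest).dropLast = x :: (y :: rest).dropLast := by
        simp [List.dropLast]
      have hlast : (x :: y :: rest).getLastD "" = (y :: rest).getLastD "" := by
        simp
      have hscl : (c :: scanC (carryF c x) (y :: rest).dropLast).getLastD false
          = (scanC (carryF c x) (y :: rest).dropLast).getLastD false := by
        cases hh : scanC (carryF c x) (y :: rest).dropLast with
        | nil => exact absurd hh (scanC_ne_nil _ _)
        | cons z zs => simp
      rw [hdl, hlast]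
      simp only [scanC, List.zip_cons_cons, List.map_cons, List.cons_append, hscl]
      rw [ih (carryF c x) hne]
      show bodyElem (x, c) :: recB (y :: rest) (carryF c x) = recB (x :: y :: rest) c
      simp only [recB, bodyElem, carryF]
      cases c with
      | false =>
        by_cases hx : x = "1"
        · simp [hx]
        · have hb : (x == "1") = false := by simp [hx]
          simp [hx, hb]
      | true =>
        by_cases hx0 : x = "0"
        · simp [hx0]
        · have hb : (x == "0") = false := by simp [hx0]
          simp [hx0, hb]

theorem turnOver_alt_eq_recB (a : List String) : turnOver_alt a = recB a false := by
  match a with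
  | [] => simp [turnOver_alt, recB]
  | [x] => simp [turnOver_alt, recB]
  | x :: y :: rest =>
    have hlen : ¬ (x :: y :: rest : List String).length ≤ 1 := by simp
    rw [turnOver_alt, if_neg hlen]
    have hfold := foldl_carryStep_eq_scanC (x :: y :: rest).dropLast [false] false (by simp)
    have hsc : ([false] ++ (scanC false (x :: y :: rest).dropLast).tail)
        = scanC false (x :: y :: rest).dropLast := by
      cases hh : (x :: y :: rest).dropLast <;> simp [scanC]
    rw [hfold, hsc]
    exact staged_eq_recB (x :: y :: rest) false (by simp)

-- ===== VERDICT (by name: the statement is the Claim_ definition above) =====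
theorem turnOver_spec : Claim_equal_turnOver := by
  intro a _
  show turnOver a = turnOver_alt a
  rw [turnOver_eq_recA, turnOver_alt_eq_recB, recA_eq_recB]
  simp
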